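-- pv_equiv track=rewrite | github.com/Deepak-Laksman/DSA-Implementations-Python | BitManipulation/tripletsWithAndEqualsZero.py | tripletsCount
-- ===== SOURCE A (Python) =====
-- def tripletsCount(n, array):
--     hashmap = {}
--     for i in range(n):
--         if array[i] in hashmap.keys():
--             hashmap[array[i]] += 1
--         else:
--             hashmap[array[i]] = 1
--
--     triplets = 0
--     for i in range(n):
--         for j in range(n):
--             andValue = array[i] & array[j]
--             if i == j:
--                 triplets += n - 1
--             elif andValue in hashmap.keys():
--                 triplets += hashmap[andValue]
--
--     return triplets - 1
-- ===== SOURCE B (Python) =====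
-- def tripletsCount(n, array):
--     m = max(n, 0)
--     cnt = {}
--     for v in array[:m]:
--         cnt[v] = cnt.get(v, 0) + 1
--     items = list(cnt.items())
--     total = m * (m - 1) - 1
--     for u, cu in items:
--         for v, cv in items:
--             total += cu * cv * cnt.get(u & v, 0)
--         total -= cu * cu
--     return total
-- ===== Notes on version B (the rewrite author's own statement) =====
-- stated objective: alternative
-- what changed: Replaces A's loop over all index pairs by an aggregation over the distinct values: a frequency table is built once and each distinct pair (u,v) contributes cnt[u]*cnt[v]*cnt[u&v], with the diagonal handled by the closed form m*(m-1) and a per-value correction.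
import Mathlib
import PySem

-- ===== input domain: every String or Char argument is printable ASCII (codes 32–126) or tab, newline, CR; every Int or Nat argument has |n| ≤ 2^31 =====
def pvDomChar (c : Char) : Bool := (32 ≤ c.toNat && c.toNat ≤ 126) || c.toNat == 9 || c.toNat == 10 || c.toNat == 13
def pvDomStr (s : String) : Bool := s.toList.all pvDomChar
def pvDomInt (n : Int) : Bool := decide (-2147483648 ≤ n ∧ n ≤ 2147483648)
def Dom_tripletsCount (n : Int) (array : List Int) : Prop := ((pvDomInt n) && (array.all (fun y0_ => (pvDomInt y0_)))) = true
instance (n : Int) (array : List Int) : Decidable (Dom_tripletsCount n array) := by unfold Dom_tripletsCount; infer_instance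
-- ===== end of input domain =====

-- B replaces A's scan over all index pairs by an aggregation over the distinct values:
-- each distinct pair (u,v) contributes cnt[u]*cnt[v]*cnt[u&v], the diagonal is the closed
-- form m*(m-1) with a per-value correction (objective: alternative algorithm).

-- ===== PORT A =====
def tripletsCount (n : Int) (array : List Int) : Int :=
  let hashmap := (PySem.List.pyRange 0 n 1).foldl (fun h i =>
      if h.contains (PySem.List.pyGetD array i 0) then
        h.insert (PySem.List.pyGetD array i 0) (h.getD (PySem.List.pyGetD array i 0) 0 + 1)
      else h.insert (PySem.List.pyGetD array i 0) 1)
    PySem.Dict.empty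
  let triplets := (PySem.List.pyRange 0 n 1).foldl (fun t i =>
      (PySem.List.pyRange 0 n 1).foldl (fun t j =>
        let andValue := PySem.Int.band (PySem.List.pyGetD array i 0) (PySem.List.pyGetD array j 0)
        if i == j then t + (n - 1)
        else if hashmap.contains andValue then t + hashmap.getD andValue 0
        else t) t) 0
  triplets - 1

-- ===== PORT B =====
def tripletsCount_alt (n : Int) (array : List Int) : Int :=
  let m := max n 0
  let cnt := (PySem.List.slice array none (some m)).foldl
      (fun d v => d.insert v (d.getD v 0 + 1)) PySem.Dict.empty
  let items := cnt.items
  let total := m * (m - 1) - 1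
  items.foldl (fun total uc =>
      (items.foldl
        (fun total vc => total + uc.2 * vc.2 * cnt.getD (PySem.Int.band uc.1 vc.1) 0)
        total) - uc.2 * uc.2)
    total

-- ===== PRECONDITION & SPEC =====
-- Pre_ excludes exactly the inputs where A raises IndexError: indices 0..n-1 must exist.
def Pre_tripletsCount (n : Int) (array : List Int) : Prop := n ≤ (array.length : Int)
instance (n : Int) (array : List Int) : Decidable (Pre_tripletsCount n array) := by
  unfold Pre_tripletsCount; infer_instance
def pvWitness_tripletsCount : Int × List Int := (3, [1, 3, 1])

def Spec_tripletsCount (n : Int) (array : List Int) (out : Int) : Prop := out = tripletsCount_alt n array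
instance (n : Int) (array : List Int) (out : Int) : Decidable (Spec_tripletsCount n array out) := by unfold Spec_tripletsCount; infer_instance

-- ===== CLAIM (what is proved, stated in full; the proofs are below) =====
def Claim_equal_tripletsCount : Prop := ∀ (n : Int) (array : List Int), Dom_tripletsCount n array → Pre_tripletsCount n array → Spec_tripletsCount n array (tripletsCount n array)

-- ===== LEMMAS AND PROOFS =====

-- counter form of A's first loop
lemma first_loop_eq_counter (xs : List Int) :
    xs.foldl (fun h v => if h.contains v then h.insert v (h.getD v 0 + 1) else h.insert v 1)
      (PySem.Dict.empty : PySem.Dict Int Int)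
    = PySem.Dict.counter xs := by
  rw [← PySem.Dict.foldl_insert_getD_add_one_eq_counter]
  apply PySem.List.foldl_congr_mem
  intro d v _
  by_cases hc : d.contains v
  · simp [hc]
  · simp [hc, PySem.Dict.getD_of_not_contains d 0 (by simpa using hc)]

lemma pyGetD_take_eq (array : List Int) (n i : Int) (h0 : 0 ≤ i) (h1 : i < n)
    (h2 : n ≤ (array.length : Int)) :
    PySem.List.pyGetD array i 0 = PySem.List.pyGetD (array.take n.toNat) i 0 := by
  have hi : i.toNat < array.length := by omega
  have hi2 : i.toNat < (array.take n.toNat).length := by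
    simp [List.length_take]; omega
  rw [show i = (i.toNat : Int) by omega]
  rw [PySem.List.pyGetD_natCast, PySem.List.pyGetD_natCast]
  simp [List.getD_eq_getElem?_getD, List.getElem?_take, hi]
  rw [if_pos ⟨h1, by omega⟩]
  rfl

lemma A_canon (n : Int) (array : List Int) (hn : 0 ≤ n) (hlen : n ≤ (array.length : Int)) :
    tripletsCount n array =
      ((array.take n.toNat).map (fun a =>
          (n - 1) - ((array.take n.toNat).count a : Int)
          + ((array.take n.toNat).map
              (fun b => ((array.take n.toNat).count (PySem.Int.band a b) : Int))).sum)).sum - 1 := by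
  have hget : ∀ i ∈ PySem.List.pyRange 0 n 1,
      PySem.List.pyGetD array i 0 = PySem.List.pyGetD (array.take n.toNat) i 0 := by
    intro i hi
    rw [PySem.List.mem_pyRange_one] at hi
    exact pyGetD_take_eq array n i hi.1 hi.2 hlen
  set xs := array.take n.toNat with hxsdef
  have hxlen : (xs.length : Int) = n := by
    simp [hxsdef, List.length_take]; omega
  unfold tripletsCount
  -- first loop is Counter(xs)
  have hmap : (PySem.List.pyRange 0 n 1).foldl (fun h i =>
        if h.contains (PySem.List.pyGetD array i 0) then
          h.insert (PySem.List.pyGetD array i 0) (h.getD (PySem.List.pyGetD array i 0) 0 + 1)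
        else h.insert (PySem.List.pyGetD array i 0) 1)
        (PySem.Dict.empty : PySem.Dict Int Int)
      = PySem.Dict.counter xs := by
    have h1 : (PySem.List.pyRange 0 n 1).foldl (fun h i =>
          if h.contains (PySem.List.pyGetD array i 0) then
            h.insert (PySem.List.pyGetD array i 0) (h.getD (PySem.List.pyGetD array i 0) 0 + 1)
          else h.insert (PySem.List.pyGetD array i 0) 1)
          (PySem.Dict.empty : PySem.Dict Int Int)
        = (PySem.List.pyRange 0 n 1).foldl (fun h i =>
          if h.contains (PySem.List.pyGetD xs i 0) then
            h.insert (PySem.List.pyGetD xs i 0) (h.getD (PySem.List.pyGetD xs i 0) 0 + 1)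
          else h.insert (PySem.List.pyGetD xs i 0) 1)
          (PySem.Dict.empty : PySem.Dict Int Int) :=
      by apply PySem.List.foldl_congr_mem; intro acc x hx; simp only [hget x hx]
    rw [h1, ← hxlen]
    exact (PySem.List.foldl_pyRange_zero_pyGetD' xs 0
        (fun (h : PySem.Dict Int Int) v => if h.contains v then h.insert v (h.getD v 0 + 1) else h.insert v 1)
        PySem.Dict.empty).trans (first_loop_eq_counter xs)
  simp only [hmap]
  set c : Int → Int := fun w => ((xs.count w : Nat) : Int) with hc
  set F : Int → Int := fun a => (n - 1) - c a + (xs.map (fun b => c (PySem.Int.band a b))).sum with hF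
  -- inner loop: for i in range, the inner foldl adds the inner sum
  have h2 : ∀ i ∈ PySem.List.pyRange 0 n 1, ∀ (t : Int),
      (PySem.List.pyRange 0 n 1).foldl (fun t j =>
        let andValue := PySem.Int.band (PySem.List.pyGetD array i 0) (PySem.List.pyGetD array j 0)
        if i == j then t + (n - 1)
        else if (PySem.Dict.counter xs).contains andValue then
          t + (PySem.Dict.counter xs).getD andValue 0
        else t) t
      = t + ((PySem.List.pyRange 0 n 1).map (fun j =>
          if i = j then n - 1
          else c (PySem.Int.band (PySem.List.pyGetD xs i 0) (PySem.List.pyGetD xs j 0)))).sum := by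
    intro i hi t
    refine Eq.trans ?_ (PySem.List.foldl_add _ _ _)
    apply PySem.List.foldl_congr_mem
    intro acc j hj
    simp only [hget i hi, hget j hj]
    by_cases hij : i = j
    · simp [hij]
    · simp only [hij, beq_iff_eq, if_false]
      by_cases hmem : PySem.Int.band (PySem.List.pyGetD xs i 0) (PySem.List.pyGetD xs j 0) ∈ xs
      · simp [PySem.Dict.contains_counter, PySem.Dict.getD_counter, hmem, hc]
      · simp [PySem.Dict.contains_counter, hmem, hc, List.count_eq_zero.2 hmem]
  -- outer loop
  have h3 : (PySem.List.pyRange 0 n 1).foldl (fun t i =>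
      (PySem.List.pyRange 0 n 1).foldl (fun t j =>
        let andValue := PySem.Int.band (PySem.List.pyGetD array i 0) (PySem.List.pyGetD array j 0)
        if i == j then t + (n - 1)
        else if (PySem.Dict.counter xs).contains andValue then
          t + (PySem.Dict.counter xs).getD andValue 0
        else t) t) (0 : Int)
      = (0 : Int) + ((PySem.List.pyRange 0 n 1).map (fun i =>
          ((PySem.List.pyRange 0 n 1).map (fun j =>
            if i = j then n - 1
            else c (PySem.Int.band (PySem.List.pyGetD xs i 0) (PySem.List.pyGetD xs j 0)))).sum)).sum := by
    refine Eq.trans ?_ (PySem.List.foldl_add _ _ _)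
    apply PySem.List.foldl_congr_mem
    intro acc i hi
    exact h2 i hi acc
  rw [h3]
  -- simplify the inner sum for each i in range
  have h4 : ∀ i ∈ PySem.List.pyRange 0 n 1,
      ((PySem.List.pyRange 0 n 1).map (fun j =>
        if i = j then n - 1
        else c (PySem.Int.band (PySem.List.pyGetD xs i 0) (PySem.List.pyGetD xs j 0)))).sum
      = F (PySem.List.pyGetD xs i 0) := by
    intro i hi
    have hsplit : ((PySem.List.pyRange 0 n 1).map (fun j =>
        if i = j then n - 1
        else c (PySem.Int.band (PySem.List.pyGetD xs i 0) (PySem.List.pyGetD xs j 0)))).sum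
      = ((PySem.List.pyRange 0 n 1).map (fun j =>
          c (PySem.Int.band (PySem.List.pyGetD xs i 0) (PySem.List.pyGetD xs j 0)))).sum
        + ((PySem.List.pyRange 0 n 1).map (fun j =>
          if i = j then (n - 1) - c (PySem.Int.band (PySem.List.pyGetD xs i 0) (PySem.List.pyGetD xs j 0)) else 0)).sum := by
      rw [← PySem.List.sum_map_add_int]
      apply congrArg
      apply List.map_congr_left
      intro j _
      by_cases hij : i = j <;> simp [hij]
    rw [hsplit]
    have hsingle : ((PySem.List.pyRange 0 n 1).map (fun j =>
        if i = j then (n - 1) - c (PySem.Int.band (PySem.List.pyGetD xs i 0) (PySem.List.pyGetD xs j 0)) else 0)).sum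
      = (n - 1) - c (PySem.List.pyGetD xs i 0) := by
      rw [List.sum_map_eq_nsmul_single i _ (by
        intro j hji hjmem
        rw [if_neg (fun hh => hji hh.symm)])]
      rw [List.count_eq_one_of_mem (PySem.List.nodup_pyRange_one 0 n) hi]
      simp [PySem.Int.band_self]
    rw [hsingle]
    have hvals : ((PySem.List.pyRange 0 n 1).map (fun j =>
        c (PySem.Int.band (PySem.List.pyGetD xs i 0) (PySem.List.pyGetD xs j 0)))).sum
      = (xs.map (fun b => c (PySem.Int.band (PySem.List.pyGetD xs i 0) b))).sum := by
      conv_lhs => rw [show (fun j => c (PySem.Int.band (PySem.List.pyGetD xs i 0) (PySem.List.pyGetD xs j 0)))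
        = (fun b => c (PySem.Int.band (PySem.List.pyGetD xs i 0) b)) ∘ (fun j => PySem.List.pyGetD xs j 0) from rfl]
      rw [← List.map_map, ← hxlen, PySem.List.map_pyGetD_pyRange_zero' xs 0]
    rw [hvals, hF]
    ring
  rw [List.map_congr_left h4]
  have houter : ((PySem.List.pyRange 0 n 1).map (fun i => F (PySem.List.pyGetD xs i 0))).sum
      = (xs.map F).sum := by
    conv_lhs => rw [show (fun i => F (PySem.List.pyGetD xs i 0))
      = F ∘ (fun i => PySem.List.pyGetD xs i 0) from rfl]
    rw [← List.map_map, ← hxlen, PySem.List.map_pyGetD_pyRange_zero' xs 0]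
  rw [houter]
  ring

lemma B_canon (n : Int) (array : List Int) (hn : 0 ≤ n) :
    tripletsCount_alt n array =
      n * (n - 1) - 1 +
      ((PySem.List.dedup (array.take n.toNat)).map (fun u =>
        ((PySem.List.dedup (array.take n.toNat)).map (fun v =>
          ((array.take n.toNat).count u : Int) * ((array.take n.toNat).count v : Int)
            * ((array.take n.toNat).count (PySem.Int.band u v) : Int))).sum
        - ((array.take n.toNat).count u : Int) * ((array.take n.toNat).count u : Int))).sum := by
  set xs := array.take n.toNat with hxsdef
  have hmax : max n 0 = n := by omega
  unfold tripletsCount_alt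
  simp only [hmax, PySem.List.slice_to array hn, ← hxsdef,
    PySem.Dict.foldl_insert_getD_add_one_eq_counter]
  have houter : (PySem.Dict.counter xs).items.foldl (fun total uc =>
        ((PySem.Dict.counter xs).items.foldl
          (fun total vc => total + uc.2 * vc.2 * (PySem.Dict.counter xs).getD (PySem.Int.band uc.1 vc.1) 0)
          total) - uc.2 * uc.2)
        (n * (n - 1) - 1)
      = (n * (n - 1) - 1) + ((PySem.Dict.counter xs).items.map (fun uc =>
          ((PySem.Dict.counter xs).items.map
            (fun vc => uc.2 * vc.2 * (PySem.Dict.counter xs).getD (PySem.Int.band uc.1 vc.1) 0)).sum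
          - uc.2 * uc.2)).sum := by
    refine Eq.trans ?_ (PySem.List.foldl_add _ _ _)
    apply PySem.List.foldl_congr_mem
    intro acc uc _
    rw [PySem.List.foldl_add]
    ring
  rw [houter]
  congr 1
  rw [PySem.Dict.items_counter, List.map_map, ← PySem.List.dedup_eq_ofList]
  apply congrArg
  apply List.map_congr_left
  intro u hu
  simp only [Function.comp]
  rw [List.map_map]
  congr 1
  apply congrArg
  apply List.map_congr_left
  intro v hv
  simp [PySem.Dict.getD_counter]

lemma agg (xs : List Int) (f : Int → Int) :
    (xs.map f).sum = ((PySem.List.dedup xs).map (fun u => ((xs.count u : Nat) : Int) * f u)).sum := by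
  have h2 : (PySem.List.dedup xs).toFinset = xs.toFinset := by
    ext a; simp
  rw [Finset.sum_list_map_count xs f, ← List.sum_toFinset _ (PySem.List.nodup_dedup xs), h2]
  simp


lemma combine (xs : List Int) (n : Int) (hlen : (xs.length : Int) = n) :
    (xs.map (fun a => (n - 1) - ((xs.count a : Nat) : Int)
        + (xs.map (fun b => ((xs.count (PySem.Int.band a b) : Nat) : Int))).sum)).sum - 1
    = n * (n - 1) - 1
      + ((PySem.List.dedup xs).map (fun u =>
          ((PySem.List.dedup xs).map (fun v =>
            ((xs.count u : Nat) : Int) * ((xs.count v : Nat) : Int)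
              * ((xs.count (PySem.Int.band u v) : Nat) : Int))).sum
          - ((xs.count u : Nat) : Int) * ((xs.count u : Nat) : Int))).sum := by
  rw [agg xs (fun a => (n - 1) - ((xs.count a : Nat) : Int)
        + (xs.map (fun b => ((xs.count (PySem.Int.band a b) : Nat) : Int))).sum)]
  have hper : ∀ u ∈ PySem.List.dedup xs,
      ((xs.count u : Nat) : Int) * ((n - 1) - ((xs.count u : Nat) : Int)
        + (xs.map (fun b => ((xs.count (PySem.Int.band u b) : Nat) : Int))).sum)
      = ((xs.count u : Nat) : Int) * (n - 1)
        + (((PySem.List.dedup xs).map (fun v =>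
            ((xs.count u : Nat) : Int) * ((xs.count v : Nat) : Int)
              * ((xs.count (PySem.Int.band u v) : Nat) : Int))).sum
          - ((xs.count u : Nat) : Int) * ((xs.count u : Nat) : Int)) := by
    intro u _
    rw [agg xs (fun b => ((xs.count (PySem.Int.band u b) : Nat) : Int))]
    have hmul : ((xs.count u : Nat) : Int) * ((PySem.List.dedup xs).map (fun v =>
          ((xs.count v : Nat) : Int) * ((xs.count (PySem.Int.band u v) : Nat) : Int))).sum
        = ((PySem.List.dedup xs).map (fun v =>
          ((xs.count u : Nat) : Int) * ((xs.count v : Nat) : Int)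
            * ((xs.count (PySem.Int.band u v) : Nat) : Int))).sum := by
      rw [← List.sum_map_mul_left]
      apply congrArg
      apply List.map_congr_left
      intro v _
      ring
    rw [mul_add, mul_sub, hmul]
    ring
  rw [List.map_congr_left hper, PySem.List.sum_map_add_int]
  have hconst : ((PySem.List.dedup xs).map (fun u => ((xs.count u : Nat) : Int) * (n - 1))).sum
      = n * (n - 1) := by
    rw [← agg xs (fun _ => n - 1), PySem.List.sum_map_const_int, hlen]
  rw [hconst]
  ring


-- ===== VERDICT (by name: the statement is the Claim_ definition above) =====
theorem tripletsCount_spec : Claim_equal_tripletsCount := by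
  intro n array _ hpre
  unfold Spec_tripletsCount
  unfold Pre_tripletsCount at hpre
  by_cases hn : 0 ≤ n
  · rw [A_canon n array hn hpre, B_canon n array hn]
    exact combine (array.take n.toNat) n (by simp [List.length_take]; omega)
  · have hneg : n ≤ 0 := by omega
    have hmax : max n 0 = 0 := by omega
    unfold tripletsCount tripletsCount_alt
    rw [PySem.List.pyRange_one_eq_nil hneg]
    simp [hmax, PySem.List.slice_to array (by norm_num : (0:Int) ≤ 0)]
    rfl
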